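-- pv_equiv track=rewrite | github.com/LCharp/LCharp.github.io | sv/scripts/activity_types.py | _virtual_variant
-- ===== SOURCE A (Python) =====
-- def _virtual_variant(slug: str) -> str:
--     if "row" in slug:
--         return "VirtualRow"
--     if any(token in slug for token in ("ride", "bike", "cycle")):
--         return "VirtualRide"
--     if any(token in slug for token in ("run", "walk")):
--         return "VirtualRun"
--     return ""
-- ===== SOURCE B (Python) =====
-- _PRIORITY = {"row": 0, "ride": 1, "bike": 1, "cycle": 1, "run": 2, "walk": 2}
-- _VARIANTS = ("VirtualRow", "VirtualRide", "VirtualRun")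
--
-- def _virtual_variant(slug: str) -> str:
--     # Single scan: at each position, match tokens by hand and keep the minimum priority.
--     best = 3
--     for i in range(len(slug)):
--         for token, p in _PRIORITY.items():
--             if p < best and slug.startswith(token, i):
--                 best = p
--     return _VARIANTS[best] if best < 3 else ""
-- ===== Notes on version B (the rewrite author's own statement) =====
-- stated objective: alternative
-- what changed: Replaces A's chain of substring-membership branches by a single left-to-right scan of the string that matches the tokens by hand at each position via a token-to-priority map and keeps the minimum priority seen, indexing the variant table at the end.
import Mathlib
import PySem

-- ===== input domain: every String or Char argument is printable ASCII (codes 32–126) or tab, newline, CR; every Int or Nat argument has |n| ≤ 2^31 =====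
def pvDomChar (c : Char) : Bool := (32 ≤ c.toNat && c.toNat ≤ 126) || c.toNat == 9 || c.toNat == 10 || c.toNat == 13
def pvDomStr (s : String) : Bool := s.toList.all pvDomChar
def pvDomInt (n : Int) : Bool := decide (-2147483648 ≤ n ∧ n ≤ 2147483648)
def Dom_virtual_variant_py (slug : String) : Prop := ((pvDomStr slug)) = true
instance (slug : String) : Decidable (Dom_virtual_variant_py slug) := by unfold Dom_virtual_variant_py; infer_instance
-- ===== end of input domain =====

-- B replaces A's chain of substring-membership branches by one left-to-right scan of the
-- string that matches the tokens by hand at each position and keeps the minimum priority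
-- seen (alternative algorithm; same cost).


-- ===== PORT A =====
-- literal transliteration of A: chain of membership tests in branch order
def virtual_variant_py (slug : String) : String :=
  if PySem.Str.isIn "row" slug then "VirtualRow"
  else if (["ride", "bike", "cycle"].any fun token => PySem.Str.isIn token slug) then "VirtualRide"
  else if (["run", "walk"].any fun token => PySem.Str.isIn token slug) then "VirtualRun"
  else ""

-- ===== PORT B =====
-- B's token → priority map (_PRIORITY, in insertion order) and variant table (_VARIANTS)
def vvPriority : List (List Char × Nat) :=
  [("row".toList, 0), ("ride".toList, 1), ("bike".toList, 1),
   ("cycle".toList, 1), ("run".toList, 2), ("walk".toList, 2)]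

def vvVariants : List String := ["VirtualRow", "VirtualRide", "VirtualRun"]

-- inner loop of B: 'for token, p in _PRIORITY.items(): if p < best and slug.startswith(token, i)';
-- slug.startswith(token, i) (0 ≤ i ≤ len) is exactly token.toList.isPrefixOf (slug.toList.drop i)
def vvStep (cs : List Char) (best : Nat) : Nat :=
  vvPriority.foldl (fun b tp => if tp.2 < b && tp.1.isPrefixOf cs then tp.2 else b) best

-- outer loop of B: 'for i in range(len(slug))' visits the nonempty suffixes slug[i:] in order
def vvScan : List Char → Nat → Nat
  | [], best => best
  | c :: rest, best => vvScan rest (vvStep (c :: rest) best)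

def virtual_variant_py_alt (slug : String) : String :=
  let best := vvScan slug.toList 3
  if best < 3 then vvVariants.getD best "" else ""

-- ===== PRECONDITION & SPEC =====
def Spec_virtual_variant_py (slug : String) (out : String) : Prop := out = virtual_variant_py_alt slug
instance (slug : String) (out : String) : Decidable (Spec_virtual_variant_py slug out) := by unfold Spec_virtual_variant_py; infer_instance

-- ===== CLAIM (what is proved, stated in full; the proofs are below) =====
def Claim_equal_virtual_variant_py : Prop := ∀ (slug : String), Dom_virtual_variant_py slug → Spec_virtual_variant_py slug (virtual_variant_py slug)

-- ===== LEMMAS AND PROOFS =====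

-- category selector: 0 = row, 1 = ride group, 2 = run group, 3 = none
def vvCat (r g w : Bool) : Nat := if r then 0 else if g then 1 else if w then 2 else 3

-- priority of the best token starting exactly at the head of cs (3 = none)
def vvPAt (cs : List Char) : Nat :=
  vvCat (decide ("row".toList <+: cs))
        (decide ("ride".toList <+: cs ∨ "bike".toList <+: cs ∨ "cycle".toList <+: cs))
        (decide ("run".toList <+: cs ∨ "walk".toList <+: cs))

-- priority of the best token occurring anywhere in cs (3 = none)
def vvPrio (cs : List Char) : Nat :=
  vvCat (decide ("row".toList <:+: cs))
        (decide ("ride".toList <:+: cs ∨ "bike".toList <:+: cs ∨ "cycle".toList <:+: cs))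
        (decide ("run".toList <:+: cs ∨ "walk".toList <:+: cs))

theorem vvCat_or : ∀ (a b c d e f : Bool),
    vvCat (a || d) (b || e) (c || f) = min (vvCat a b c) (vvCat d e f) := by decide

set_option maxHeartbeats 1000000 in
theorem vvStep_eq (cs : List Char) (b : Nat) (hb : b ≤ 3) : vvStep cs b = min b (vvPAt cs) := by
  by_cases h1 : ['r','o','w'] <+: cs <;>
  by_cases h2 : ['r','i','d','e'] <+: cs <;>
  by_cases h3 : ['b','i','k','e'] <+: cs <;>
  by_cases h4 : ['c','y','c','l','e'] <+: cs <;>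
  by_cases h5 : ['r','u','n'] <+: cs <;>
  by_cases h6 : ['w','a','l','k'] <+: cs <;>
    simp [vvStep, vvPriority, vvPAt, vvCat, List.isPrefixOf_iff_prefix,
      h1, h2, h3, h4, h5, h6] <;>
    first | omega | (split_ifs <;> omega)

theorem vvPrio_cons (c : Char) (rest : List Char) :
    vvPrio (c :: rest) = min (vvPAt (c :: rest)) (vvPrio rest) := by
  unfold vvPrio vvPAt
  have g1 : decide ("row".toList <:+: c :: rest)
      = (decide ("row".toList <+: c :: rest) || decide ("row".toList <:+: rest)) := by
    rw [← Bool.decide_or, decide_eq_decide]; exact List.infix_cons_iff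
  have g2 : decide ("ride".toList <:+: c :: rest ∨ "bike".toList <:+: c :: rest ∨ "cycle".toList <:+: c :: rest)
      = (decide ("ride".toList <+: c :: rest ∨ "bike".toList <+: c :: rest ∨ "cycle".toList <+: c :: rest)
         || decide ("ride".toList <:+: rest ∨ "bike".toList <:+: rest ∨ "cycle".toList <:+: rest)) := by
    rw [← Bool.decide_or, decide_eq_decide]
    simp only [List.infix_cons_iff]; tauto
  have g3 : decide ("run".toList <:+: c :: rest ∨ "walk".toList <:+: c :: rest)
      = (decide ("run".toList <+: c :: rest ∨ "walk".toList <+: c :: rest)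
         || decide ("run".toList <:+: rest ∨ "walk".toList <:+: rest)) := by
    rw [← Bool.decide_or, decide_eq_decide]
    simp only [List.infix_cons_iff]; tauto
  rw [g1, g2, g3]
  exact vvCat_or _ _ _ _ _ _

theorem vvPrio_le (cs : List Char) : vvPrio cs ≤ 3 := by
  unfold vvPrio vvCat; split_ifs <;> omega

theorem vvScan_le (cs : List Char) : ∀ (b : Nat), b ≤ 3 → vvScan cs b = min b (vvPrio cs) := by
  induction cs with
  | nil => intro b hb; simp only [vvScan, vvPrio, vvCat]; simp; omega
  | cons c rest ih =>
    intro b hb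
    have hstep : vvStep (c :: rest) b ≤ 3 := by rw [vvStep_eq _ _ hb]; omega
    rw [vvScan, ih _ hstep, vvStep_eq _ _ hb, vvPrio_cons]
    omega

set_option maxHeartbeats 2000000 in
theorem virtual_variant_py_spec : Claim_equal_virtual_variant_py := by
  intro slug _
  unfold Spec_virtual_variant_py virtual_variant_py virtual_variant_py_alt
  rw [show vvScan slug.toList 3 = min 3 (vvPrio slug.toList) from vvScan_le _ 3 (by omega)]
  have hm : min 3 (vvPrio slug.toList) = vvPrio slug.toList := by
    have := vvPrio_le slug.toList; omega
  rw [hm]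
  by_cases h1 : ['r','o','w'] <:+: slug.toList <;>
  by_cases h2 : ['r','i','d','e'] <:+: slug.toList <;>
  by_cases h3 : ['b','i','k','e'] <:+: slug.toList <;>
  by_cases h4 : ['c','y','c','l','e'] <:+: slug.toList <;>
  by_cases h5 : ['r','u','n'] <:+: slug.toList <;>
  by_cases h6 : ['w','a','l','k'] <:+: slug.toList <;>
    simp [vvPrio, vvCat, vvVariants,
      PySem.Chars.isIn_iff_infix, h1, h2, h3, h4, h5, h6]
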